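-- pv_equiv track=rewrite | github.com/26XIIMuseum/26XIIMuseum.github.io | src/hooks.py | aos
-- ===== SOURCE A (Python) =====
-- def aos(content):
--   aos_content = ""
--   found_h2 = False
--   direction = "left"
--   for line in content.splitlines():
--      if "<h2 id=" in line:
--        if found_h2:
--          aos_content += "\n</div>\n"
-- #       aos_content += f'<div data-aos="flip-{direction}">\n'
--        aos_content += f'<div data-aos="zoom-in" data-aos-duration="1000">\n'
--        aos_content += line
--        found_h2 = True
--        direction = "right" if direction == "left" else "left"
--      else:
--        aos_content += line
--   if found_h2:
--     aos_content += "\n</div>\n"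
--   return aos_content
-- ===== SOURCE B (Python) =====
-- HEADER = '<div data-aos="zoom-in" data-aos-duration="1000">\n'
-- FOOTER = '\n</div>\n'
--
-- def aos(content):
--     lines = content.splitlines()
--     n = len(lines)
--     # pass 1: advance past the preamble (lines before the first h2)
--     i = 0
--     while i < n and "<h2 id=" not in lines[i]:
--         i += 1
--     parts = ["".join(lines[:i])]
--     # pass 2: each h2 line plus its following non-h2 lines is one section
--     while i < n:
--         j = i + 1
--         while j < n and "<h2 id=" not in lines[j]:
--             j += 1
--         parts.append(HEADER + "".join(lines[i:j]) + FOOTER)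
--         i = j
--     return "".join(parts)
-- ===== Notes on version B (the rewrite author's own statement) =====
-- stated objective: alternative
-- what changed: B replaces A's single stateful accumulation loop (found_h2/direction flags, footer emitted lazily before the next header) with a two-phase decomposition: an index scan that first skips the preamble and then delimits each h2-led section by its end index, followed by rendering each section as header + joined slice + footer.
import Mathlib
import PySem

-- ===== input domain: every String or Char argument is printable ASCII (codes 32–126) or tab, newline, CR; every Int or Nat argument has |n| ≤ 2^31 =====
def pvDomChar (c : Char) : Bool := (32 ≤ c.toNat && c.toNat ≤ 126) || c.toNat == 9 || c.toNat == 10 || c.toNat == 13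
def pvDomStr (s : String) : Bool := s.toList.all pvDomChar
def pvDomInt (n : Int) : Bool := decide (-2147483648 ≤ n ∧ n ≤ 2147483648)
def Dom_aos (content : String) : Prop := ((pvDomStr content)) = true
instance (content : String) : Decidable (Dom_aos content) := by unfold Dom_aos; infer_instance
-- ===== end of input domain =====

-- B wraps each '<h2 id=' section by first delimiting sections (preamble, then one group per h2),
-- then rendering each group, instead of A's stateful single loop; same O(n) cost, no speed claim.

-- shared string literals / test, as List Char (PySem strings are exact over List Char)
def pvH (l : String) : Bool := PySem.Str.isIn "<h2 id=" l
def pvHDR : List Char := "<div data-aos=\"zoom-in\" data-aos-duration=\"1000\">\n".toList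
def pvFTR : List Char := "\n</div>\n".toList

-- ===== PORT A =====
-- state: (aos_content, found_h2, direction)
def aosStep (st : List Char × Bool × String) (line : String) : List Char × Bool × String :=
  if pvH line then
    ((if st.2.1 then st.1 ++ pvFTR else st.1) ++ pvHDR ++ line.toList, true,
      if st.2.2 == "left" then "right" else "left")
  else
    (st.1 ++ line.toList, st.2.1, st.2.2)

def aos (content : String) : String :=
  let st := (PySem.Str.splitlines content).foldl aosStep ([], false, "left")
  String.mk (if st.2.1 then st.1 ++ pvFTR else st.1)

-- ===== PORT B =====
-- 'advance while not h2': the scanned (joined) prefix and the rest (empty or h2-headed)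
def pvSpan : List String → List Char × List String
  | [] => ([], [])
  | l :: r =>
    if pvH l then ([], l :: r)
    else
      let p := pvSpan r
      (l.toList ++ p.1, p.2)

theorem pvSpan_rest_le : ∀ (ls : List String), (pvSpan ls).2.length ≤ ls.length := by
  intro ls
  induction ls with
  | nil => simp [pvSpan]
  | cons l r ih =>
    simp only [pvSpan]
    split
    · simp
    · simpa using Nat.le_succ_of_le ih

-- one section per leading h2 line: header + h2 line + following non-h2 lines + footer
def pvRender : List String → List Char
  | [] => []
  | l :: r =>
    let p := pvSpan r
    pvHDR ++ l.toList ++ p.1 ++ pvFTR ++ pvRender p.2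
termination_by ls => ls.length
decreasing_by
  exact Nat.lt_succ_of_le (pvSpan_rest_le r)

def aos_alt (content : String) : String :=
  let p := pvSpan (PySem.Str.splitlines content)
  String.mk (p.1 ++ pvRender p.2)

-- ===== PRECONDITION & SPEC =====
def Spec_aos (content : String) (out : String) : Prop := out = aos_alt content
instance (content : String) (out : String) : Decidable (Spec_aos content out) := by unfold Spec_aos; infer_instance

-- ===== CLAIM (what is proved, stated in full; the proofs are below) =====
def Claim_equal_aos : Prop := ∀ (content : String), Dom_aos content → Spec_aos content (aos content)

-- ===== LEMMAS AND PROOFS =====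

-- finish = the trailing 'if found_h2: += footer' of A
def pvFinish (st : List Char × Bool × String) : List Char :=
  if st.2.1 then st.1 ++ pvFTR else st.1

-- A's loop continued from found_h2 = true: emits the pending body, the footer, then the remaining sections
theorem pvLoop_true : ∀ (ls : List String) (acc : List Char) (dir : String),
    pvFinish (ls.foldl aosStep (acc, true, dir))
      = acc ++ (pvSpan ls).1 ++ pvFTR ++ pvRender (pvSpan ls).2 := by
  intro ls
  induction ls with
  | nil => intro acc dir; simp [pvSpan, pvRender, pvFinish]
  | cons l r ih =>
    intro acc dir
    by_cases h : pvH l = true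
    · simp only [List.foldl_cons, aosStep, h, if_pos, pvSpan, pvRender, ih]
      simp [h, pvRender]
    · simp only [List.foldl_cons, aosStep, h, Bool.false_eq_true, if_false, pvSpan]
      simp [ih]

-- A's loop from the initial state: preamble, then the sections
theorem pvLoop_false : ∀ (ls : List String) (acc : List Char) (dir : String),
    pvFinish (ls.foldl aosStep (acc, false, dir))
      = acc ++ (pvSpan ls).1 ++ pvRender (pvSpan ls).2 := by
  intro ls
  induction ls with
  | nil => intro acc dir; simp [pvSpan, pvRender, pvFinish]
  | cons l r ih =>
    intro acc dir
    by_cases h : pvH l = true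
    · simp only [List.foldl_cons, aosStep, h, if_pos]
      rw [pvLoop_true]
      simp [pvSpan, h, pvRender]
    · simp only [List.foldl_cons, aosStep, h, Bool.false_eq_true, if_false, pvSpan]
      simp [ih]

-- ===== VERDICT (by name: the statement is the Claim_ definition above) =====
theorem aos_spec : Claim_equal_aos := by
  intro content _
  unfold Spec_aos aos aos_alt
  have := pvLoop_false (PySem.Str.splitlines content) [] "left"
  simp only [pvFinish] at this
  simp [this]
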